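-- pv_equiv track=rewrite | github.com/SurenMar/uwpathr | backend/courses/utils/course_utils.py | split_full_code
-- ===== SOURCE A (Python) =====
-- def split_full_code(full_code: str):
--     """Splits course code: 'CS246' -> ('CS', '246')"""
--     code: str = ''
--     number: str = ''
--     reading_num: bool = False
--     for c in full_code:
--       if c.isnumeric():
--         reading_num = True
--
--       if not reading_num:
--         code += c
--       else:
--         number += c
--     return (code, number)
-- ===== SOURCE B (Python) =====
-- def split_full_code(full_code: str):
--     """Splits course code: 'CS246' -> ('CS', '246')"""
--     i = next((j for j, c in enumerate(full_code) if c.isnumeric()), len(full_code))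
--     return (full_code[:i], full_code[i:])
-- ===== Notes on version B (the rewrite author's own statement) =====
-- stated objective: simpler
-- what changed: Replaces the per-character two-accumulator latch loop with locate-the-first-digit-then-slice: one index scan plus two slices.
import Mathlib
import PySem

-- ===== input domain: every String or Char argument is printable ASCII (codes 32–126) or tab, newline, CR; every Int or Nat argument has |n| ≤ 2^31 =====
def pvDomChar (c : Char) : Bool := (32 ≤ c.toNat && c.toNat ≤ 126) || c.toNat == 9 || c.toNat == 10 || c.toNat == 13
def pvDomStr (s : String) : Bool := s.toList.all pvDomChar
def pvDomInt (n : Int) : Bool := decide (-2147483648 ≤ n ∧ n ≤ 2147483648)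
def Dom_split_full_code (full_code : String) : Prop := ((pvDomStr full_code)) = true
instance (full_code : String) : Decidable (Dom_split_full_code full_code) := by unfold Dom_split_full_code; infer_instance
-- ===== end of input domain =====

-- B replaces A's per-character two-accumulator latch loop with locate-the-first-digit-then-slice (simpler decomposition).


-- ===== PORT A =====
-- 'c.isnumeric()' ported as PySem.Chars.isdigit: exact on the printable-ASCII domain, where isnumeric = isdigit.
-- A's loop body as a named helper (the state is (code, number, reading_num))
def pvStepA (st : List Char × List Char × Bool) (c : Char) : List Char × List Char × Bool :=
  let reading_num := if PySem.Chars.isdigit c then true else st.2.2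
  if !reading_num then (st.1 ++ [c], st.2.1, reading_num)
  else (st.1, st.2.1 ++ [c], reading_num)

def split_full_code (full_code : String) : String × String :=
  let r := full_code.toList.foldl pvStepA ([], [], false)
  (String.ofList r.1, String.ofList r.2.1)

-- ===== PORT B =====
-- 'next((j for j,c in enumerate(s) if c.isnumeric()), len(s))' = findIdx; slices s[:i], s[i:] with 0 ≤ i ≤ len are take/drop.
def split_full_code_alt (full_code : String) : String × String :=
  let l := full_code.toList
  let i := l.findIdx (fun c => PySem.Chars.isdigit c)
  (String.ofList (l.take i), String.ofList (l.drop i))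

-- ===== PRECONDITION & SPEC =====
def Spec_split_full_code (full_code : String) (out : String × String) : Prop := out = split_full_code_alt full_code
instance (full_code : String) (out : String × String) : Decidable (Spec_split_full_code full_code out) := by unfold Spec_split_full_code; infer_instance

-- ===== CLAIM (what is proved, stated in full; the proofs are below) =====
def Claim_equal_split_full_code : Prop := ∀ (full_code : String), Dom_split_full_code full_code → Spec_split_full_code full_code (split_full_code full_code)

-- ===== LEMMAS AND PROOFS =====

theorem pv_stepA_true (c n : List Char) (ch : Char) :
    pvStepA (c, n, true) ch = (c, n ++ [ch], true) := by
  simp [pvStepA]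

theorem pv_foldA_true (l : List Char) (c n : List Char) :
    l.foldl pvStepA (c, n, true) = (c, n ++ l, true) := by
  induction l generalizing n with
  | nil => simp
  | cons hd tl ih => rw [List.foldl_cons, pv_stepA_true, ih]; simp

theorem pv_foldA_false (l : List Char) (c n : List Char) :
    l.foldl pvStepA (c, n, false)
    = (c ++ l.takeWhile (fun x => !PySem.Chars.isdigit x),
       n ++ l.dropWhile (fun x => !PySem.Chars.isdigit x),
       l.any (fun x => PySem.Chars.isdigit x)) := by
  induction l generalizing c with
  | nil => simp
  | cons hd tl ih =>
      rw [List.foldl_cons]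
      by_cases h : PySem.Chars.isdigit hd
      · rw [show pvStepA (c, n, false) hd = (c, n ++ [hd], true) from by simp [pvStepA, h],
            pv_foldA_true]
        simp [h]
      · rw [show pvStepA (c, n, false) hd = (c ++ [hd], n, false) from by simp [pvStepA, h],
            ih]
        simp [h]

theorem pv_take_findIdx (l : List Char) :
    l.take (l.findIdx (fun c => PySem.Chars.isdigit c)) = l.takeWhile (fun x => !PySem.Chars.isdigit x) := by
  induction l with
  | nil => simp
  | cons hd tl ih =>
      by_cases h : PySem.Chars.isdigit hd
      · simp [List.findIdx_cons, h]
      · simp [List.findIdx_cons, h, ih]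

theorem pv_drop_findIdx (l : List Char) :
    l.drop (l.findIdx (fun c => PySem.Chars.isdigit c)) = l.dropWhile (fun x => !PySem.Chars.isdigit x) := by
  induction l with
  | nil => simp
  | cons hd tl ih =>
      by_cases h : PySem.Chars.isdigit hd
      · simp [List.findIdx_cons, h]
      · simp [List.findIdx_cons, h, ih]

-- ===== VERDICT (by name: the statement is the Claim_ definition above) =====
theorem split_full_code_spec : Claim_equal_split_full_code := by
  intro s _
  unfold Spec_split_full_code split_full_code split_full_code_alt
  simp only [pv_foldA_false, pv_take_findIdx, pv_drop_findIdx, List.nil_append]
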